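-- pv_equiv track=rewrite | github.com/project-sunbird/sunbird-ml-workbench | src/main/python/daggit/oplib/core/contentTaggingUtils.py | WordtoPhraseMatch
-- ===== SOURCE A (Python) =====
-- def WordtoPhraseMatch(wordlist,phraselist,DELIMITTER):
--     phrasewords=[item.split(DELIMITTER) for item in phraselist ]
--     match_count=0
--     partial_match_list=[]
--     wordlist_dynamic=wordlist[:]
--     for items in phrasewords:
--
--         word_count=0
--         word_list=[]
--         wordlist=wordlist_dynamic[:]
--         for word in wordlist:
--
--             if word in items:
--                 word_count+=1
--                 partial_match_list.append((word,'_'.join(items)))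
--                 wordlist_dynamic.remove(word)
--         match_count+=int(bool(word_count))
--     return partial_match_list,match_count
-- ===== SOURCE B (Python) =====
-- def WordtoPhraseMatch(wordlist, phraselist, DELIMITTER):
--     phrasewords = [item.split(DELIMITTER) for item in phraselist]
--     # index table: each distinct word value -> index of the first phrase containing it
--     first_phrase = {}
--     for i, items in enumerate(phrasewords):
--         for w in items:
--             first_phrase.setdefault(w, i)
--     # bucket the original wordlist (order and duplicates preserved) by first phrase
--     groups = {}
--     for w in wordlist:
--         i = first_phrase.get(w)
--         if i is not None:
--             groups.setdefault(i, []).append(w)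
--     # emit phrase by phrase
--     partial_match_list = []
--     match_count = 0
--     for i, items in enumerate(phrasewords):
--         bucket = groups.get(i, [])
--         if bucket:
--             match_count += 1
--             joined = '_'.join(items)
--             partial_match_list.extend((w, joined) for w in bucket)
--     return partial_match_list, match_count
-- ===== Notes on version B (the rewrite author's own statement) =====
-- stated objective: faster
-- what changed: Replaces A's stateful shrinking-pool nested loop (re-scanning and list.remove-ing a dynamic copy of the wordlist per phrase) with a first-containing-phrase dict built once, a single bucketing pass over the wordlist, and one emit pass over the phrases.
import Mathlib
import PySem

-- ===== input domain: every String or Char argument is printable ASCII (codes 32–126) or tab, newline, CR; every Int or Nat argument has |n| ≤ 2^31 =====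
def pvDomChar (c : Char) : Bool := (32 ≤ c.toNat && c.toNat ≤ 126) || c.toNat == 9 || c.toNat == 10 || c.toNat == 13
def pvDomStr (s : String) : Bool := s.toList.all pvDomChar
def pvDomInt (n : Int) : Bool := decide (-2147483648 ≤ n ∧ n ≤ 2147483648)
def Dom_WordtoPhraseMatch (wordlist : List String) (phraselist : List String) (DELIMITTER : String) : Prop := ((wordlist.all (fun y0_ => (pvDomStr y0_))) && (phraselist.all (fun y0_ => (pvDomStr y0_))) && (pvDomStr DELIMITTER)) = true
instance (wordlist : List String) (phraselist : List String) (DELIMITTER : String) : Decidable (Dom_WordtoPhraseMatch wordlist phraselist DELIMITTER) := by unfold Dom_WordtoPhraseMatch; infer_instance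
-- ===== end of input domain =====

-- B replaces A's stateful shrinking-pool nested loop with a first-containing-phrase index
-- table plus one bucketing pass (objective: faster).

def pvJoin (p : List String) : String := PySem.Str.join "_" p

-- ===== PORT A =====
-- inner loop body: `for word in wordlist: if word in items: …`
-- (`wordlist_dynamic.remove(word)`: the word is always present in the pool here, so `.getD` is unreachable)
def pvInnerStep (items : List String) (s : Int × List (String × String) × List String)
    (word : String) : Int × List (String × String) × List String :=
  if word ∈ items then
    (s.1 + 1, s.2.1 ++ [(word, pvJoin items)], (PySem.List.remove? s.2.2 word).getD s.2.2)
  else s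

-- outer loop body: snapshot the pool, scan it, then `match_count += int(bool(word_count))`
def pvOuterStep (st : Int × List (String × String) × List String) (items : List String) :
    Int × List (String × String) × List String :=
  let inner := st.2.2.foldl (pvInnerStep items) ((0 : Int), st.2.1, st.2.2)
  (st.1 + (if inner.1 ≠ (0 : Int) then 1 else 0), inner.2.1, inner.2.2)

-- `item.split(DELIMITTER)` raises ValueError when DELIMITTER = "" (excluded by Pre_); `.getD []` is unreachable there
def WordtoPhraseMatch (wordlist : List String) (phraselist : List String) (DELIMITTER : String) : (List (String × String)) × Int :=
  let phrasewords := phraselist.map (fun item => (PySem.Str.split? item DELIMITTER).getD [])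
  let st := phrasewords.foldl pvOuterStep ((0 : Int), ([] : List (String × String)), wordlist)
  (st.2.1, st.1)

-- ===== PORT B =====
-- first_phrase: each distinct word value -> index of the first phrase containing it
def pvFP (phrasewords : List (List String)) : PySem.Dict String Int :=
  (PySem.List.enumerate phrasewords).foldl
    (fun d p => p.2.foldl (fun d w => d.setdefault w p.1) d) PySem.Dict.empty

-- groups: bucket the wordlist (order, duplicates kept) by first phrase
def pvGroups (fp : PySem.Dict String Int) (wordlist : List String) : PySem.Dict Int (List String) :=
  wordlist.foldl
    (fun g w => match fp.get? w with
      | some i => g.modify i [] (· ++ [w])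
      | none => g) PySem.Dict.empty

-- emit loop body: phrase by phrase
def pvEmitStep (groups : PySem.Dict Int (List String))
    (acc : List (String × String) × Int) (p : Int × List String) :
    List (String × String) × Int :=
  let bucket := groups.getD p.1 []
  if bucket ≠ [] then
    (acc.1 ++ bucket.map (fun w => (w, pvJoin p.2)), acc.2 + 1)
  else acc

def WordtoPhraseMatch_alt (wordlist : List String) (phraselist : List String) (DELIMITTER : String) : (List (String × String)) × Int :=
  let phrasewords := phraselist.map (fun item => (PySem.Str.split? item DELIMITTER).getD [])
  let fp := pvFP phrasewords
  let groups := pvGroups fp wordlist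
  (PySem.List.enumerate phrasewords).foldl (pvEmitStep groups)
    (([] : List (String × String)), (0 : Int))

-- ===== PRECONDITION & SPEC =====
-- Pre_ excludes only the inputs where Python raises: str.split("") is a ValueError, reached
-- as soon as one phrase is split (both A and B raise there).
def Pre_WordtoPhraseMatch (wordlist : List String) (phraselist : List String) (DELIMITTER : String) : Prop :=
  phraselist = [] ∨ DELIMITTER ≠ ""
instance (wordlist : List String) (phraselist : List String) (DELIMITTER : String) : Decidable (Pre_WordtoPhraseMatch wordlist phraselist DELIMITTER) := by unfold Pre_WordtoPhraseMatch; infer_instance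

def pvWitness_WordtoPhraseMatch : List String × List String × String :=
  (["b", "a", "b", "zz"], ["a_c", "b", "c_b"], "_")

def Spec_WordtoPhraseMatch (wordlist : List String) (phraselist : List String) (DELIMITTER : String) (out : (List (String × String)) × Int) : Prop := out = WordtoPhraseMatch_alt wordlist phraselist DELIMITTER
instance (wordlist : List String) (phraselist : List String) (DELIMITTER : String) (out : (List (String × String)) × Int) : Decidable (Spec_WordtoPhraseMatch wordlist phraselist DELIMITTER out) := by unfold Spec_WordtoPhraseMatch; infer_instance

-- ===== CLAIM (what is proved, stated in full; the proofs are below) =====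
def Claim_equal_WordtoPhraseMatch : Prop := ∀ (wordlist : List String) (phraselist : List String) (DELIMITTER : String), Dom_WordtoPhraseMatch wordlist phraselist DELIMITTER → Pre_WordtoPhraseMatch wordlist phraselist DELIMITTER → Spec_WordtoPhraseMatch wordlist phraselist DELIMITTER (WordtoPhraseMatch wordlist phraselist DELIMITTER)

-- ===== LEMMAS AND PROOFS =====

-- A-side characterisation: progressive filters
def pvHit (p d : List String) : List String := d.filter (fun w => decide (w ∈ p))
def pvKeep (p d : List String) : List String := d.filter (fun w => !decide (w ∈ p))

def pvFlat : List (List String) → List String → List (String × String)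
  | [], _ => []
  | p :: ps, d => (pvHit p d).map (fun w => (w, pvJoin p)) ++ pvFlat ps (pvKeep p d)

def pvCnt : List (List String) → List String → Int
  | [], _ => 0
  | p :: ps, d => (if pvHit p d = [] then 0 else 1) + pvCnt ps (pvKeep p d)

def pvDyn : List (List String) → List String → List String
  | [], d => d
  | p :: ps, d => pvDyn ps (pvKeep p d)

theorem pv_remove_append (kept rest : List String) (x : String) (hx : x ∉ kept) :
    PySem.List.remove? (kept ++ x :: rest) x = some (kept ++ rest) := by
  induction kept with
  | nil => simp
  | cons k ks ih =>
      have hk : k ≠ x := by intro h; exact hx (h ▸ List.mem_cons_self)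
      have hx' : x ∉ ks := fun h => hx (List.mem_cons_of_mem _ h)
      simp [PySem.List.remove?_cons_of_ne _ hk, ih hx']

theorem pv_inner_spec (items : List String) :
    ∀ (xs kept : List String) (wc : Int) (pml : List (String × String)),
    (∀ w ∈ kept, w ∉ items) →
    xs.foldl (pvInnerStep items) (wc, pml, kept ++ xs)
      = (wc + ((pvHit items xs).length : Int),
         pml ++ (pvHit items xs).map (fun w => (w, pvJoin items)),
         kept ++ pvKeep items xs) := by
  intro xs
  induction xs with
  | nil => intro kept wc pml _; simp [pvHit, pvKeep]
  | cons x xs ih =>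
      intro kept wc pml hk
      by_cases hx : x ∈ items
      · have hxk : x ∉ kept := fun h => hk x h hx
        have hstep : pvInnerStep items (wc, pml, kept ++ x :: xs) x
            = (wc + 1, pml ++ [(x, pvJoin items)], kept ++ xs) := by
          simp [pvInnerStep, hx, pv_remove_append kept xs x hxk]
        rw [List.foldl_cons, hstep, ih kept (wc + 1) (pml ++ [(x, pvJoin items)]) hk]
        simp [pvHit, pvKeep, hx]
        omega
      · have hstep : pvInnerStep items (wc, pml, kept ++ x :: xs) x
            = (wc, pml, (kept ++ [x]) ++ xs) := by
          simp [pvInnerStep, hx]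
        have hk' : ∀ w ∈ kept ++ [x], w ∉ items := by
          intro w hw
          rcases List.mem_append.1 hw with h | h
          · exact hk w h
          · simp at h; subst h; exact hx
        rw [List.foldl_cons, hstep, ih (kept ++ [x]) wc pml hk']
        simp [pvHit, pvKeep, hx]
  
theorem pv_outer_spec :
    ∀ (P : List (List String)) (c : Int) (pml : List (String × String)) (d : List String),
    P.foldl pvOuterStep (c, pml, d)
      = (c + pvCnt P d, pml ++ pvFlat P d, pvDyn P d) := by
  intro P
  induction P with
  | nil => intro c pml d; simp [pvCnt, pvFlat, pvDyn]
  | cons p ps ih =>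
      intro c pml d
      have hinner := pv_inner_spec p d [] 0 pml (by simp)
      simp only [List.nil_append, zero_add] at hinner
      have hstep : pvOuterStep (c, pml, d) p
          = (c + (if pvHit p d = [] then 0 else 1),
             pml ++ (pvHit p d).map (fun w => (w, pvJoin p)), pvKeep p d) := by
        simp only [pvOuterStep, hinner]
        congr 1
        have : (((pvHit p d).length : Int) ≠ 0) ↔ ¬ (pvHit p d = []) := by
          constructor
          · intro h he; exact h (by simp [he])
          · intro h; intro he
            exact h (List.eq_nil_of_length_eq_zero (by exact_mod_cast he))
        by_cases he : pvHit p d = [] <;> simp [he, this]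
      rw [List.foldl_cons, hstep, ih]
      simp [pvCnt, pvFlat, pvDyn]
      omega

-- B-side characterisation
def pvFI : List (List String) → String → Option Int
  | [], _ => none
  | p :: ps, w => if w ∈ p then some 0 else (pvFI ps w).map (· + 1)

theorem pvFI_nonneg : ∀ (P : List (List String)) (w : String) (i : Int),
    pvFI P w = some i → 0 ≤ i := by
  intro P
  induction P with
  | nil => intro w i h; simp [pvFI] at h
  | cons p ps ih =>
      intro w i h
      by_cases hw : w ∈ p
      · simp [pvFI, hw] at h; omega
      · simp [pvFI, hw] at h
        rcases h with ⟨j, hj, rfl⟩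
        have := ih w j hj; omega

theorem pv_sd_fold_get? (i : Int) :
    ∀ (p : List String) (d : PySem.Dict String Int) (w : String),
    (p.foldl (fun d w' => d.setdefault w' i) d).get? w
      = if (d.get? w).isSome then d.get? w else (if w ∈ p then some i else none) := by
  intro p
  induction p with
  | nil => intro d w; by_cases h : (d.get? w).isSome <;> simp [h, Option.not_isSome_iff_eq_none.mp]
  | cons x xs ih =>
      intro d w
      rw [List.foldl_cons, ih]
      by_cases hc : d.contains x
      · rw [PySem.Dict.setdefault_of_contains _ _ hc]
        by_cases hs : (d.get? w).isSome
        · simp [hs]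
        · simp only [hs, if_false]
          by_cases hw : w = x
          · subst hw
            rw [PySem.Dict.contains_eq_isSome_get?] at hc
            exact absurd hc (by simp [hs])
          · simp [hw, List.mem_cons]
      · rw [PySem.Dict.setdefault_of_not_contains _ _ (by simpa using hc)]
        by_cases hw : w = x
        · subst hw
          have : d.get? w = none := by
            rw [PySem.Dict.contains_eq_isSome_get?] at hc
            exact Option.not_isSome_iff_eq_none.mp (by simpa using hc)
          simp [PySem.Dict.get?_insert, this, List.mem_cons]
        · rw [PySem.Dict.get?_insert]
          simp only [if_neg hw]
          by_cases hs : (d.get? w).isSome <;> simp [hs, hw, List.mem_cons]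

theorem pv_fp_get? :
    ∀ (P : List (List String)) (s : Int) (d : PySem.Dict String Int) (w : String),
    ((PySem.List.enumerate P s).foldl
        (fun d p => p.2.foldl (fun d w' => d.setdefault w' p.1) d) d).get? w
      = if (d.get? w).isSome then d.get? w else (pvFI P w).map (· + s) := by
  intro P
  induction P with
  | nil => intro s d w; by_cases h : (d.get? w).isSome <;> simp [PySem.List.enumerate_nil, pvFI, h, Option.not_isSome_iff_eq_none.mp]
  | cons p ps ih =>
      intro s d w
      rw [PySem.List.enumerate_cons, List.foldl_cons, ih, pv_sd_fold_get? s p d w]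
      by_cases hs : (d.get? w).isSome
      · simp [hs]
      · simp only [hs, if_false]
        by_cases hw : w ∈ p
        · simp [hw, pvFI]
        · simp only [hw, if_true, if_false, Option.isSome_none, pvFI]
          cases h : pvFI ps w with
          | none => simp
          | some j => simp [Option.map_map, Function.comp]; ring

theorem pvFP_get? (P : List (List String)) (w : String) :
    (pvFP P).get? w = pvFI P w := by
  rw [pvFP, pv_fp_get? P 0 PySem.Dict.empty w]
  simp only [PySem.Dict.get?_empty, Option.isSome_none, if_false]
  cases h : pvFI P w <;> simp

theorem pv_groups_getD (fp : PySem.Dict String Int) :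
    ∀ (wl : List String) (g : PySem.Dict Int (List String)) (c : Int),
    (wl.foldl (fun g w => match fp.get? w with
        | some i => g.modify i [] (· ++ [w])
        | none => g) g).getD c []
      = g.getD c [] ++ wl.filter (fun w => fp.get? w == some c) := by
  intro wl
  induction wl with
  | nil => intro g c; simp
  | cons x xs ih =>
      intro g c
      rw [List.foldl_cons]
      cases h : fp.get? x with
      | none => simp only [h]; rw [ih]; simp [List.filter_cons, h]
      | some i =>
          simp only [h]
          rw [ih]
          rw [PySem.Dict.getD_modify]
          by_cases hc : c = i
          · subst hc; simp [List.filter_cons, h]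
          · have : (some i == some c) = false :=
              beq_eq_false_iff_ne.mpr (fun h => hc (Option.some.inj h).symm)
            simp [List.filter_cons, h, hc, this]

def pvBL (f : String → Option Int) (wl : List String) :
    List (List String) → Int → List (String × String)
  | [], _ => []
  | p :: ps, k => (wl.filter (fun w => f w == some k)).map (fun w => (w, pvJoin p)) ++ pvBL f wl ps (k + 1)

def pvBC (f : String → Option Int) (wl : List String) : List (List String) → Int → Int
  | [], _ => 0
  | p :: ps, k => (if wl.filter (fun w => f w == some k) = [] then 0 else 1) + pvBC f wl ps (k + 1)

theorem pv_emit_spec (G : PySem.Dict Int (List String)) (f : String → Option Int)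
    (wl : List String) (hG : ∀ i, G.getD i [] = wl.filter (fun w => f w == some i)) :
    ∀ (P : List (List String)) (s : Int) (acc : List (String × String) × Int),
    (PySem.List.enumerate P s).foldl (pvEmitStep G) acc
      = (acc.1 ++ pvBL f wl P s, acc.2 + pvBC f wl P s) := by
  intro P
  induction P with
  | nil => intro s acc; simp [PySem.List.enumerate_nil, pvBL, pvBC]
  | cons p ps ih =>
      intro s acc
      rw [PySem.List.enumerate_cons, List.foldl_cons, ih]
      have hstep : pvEmitStep G acc (s, p)
          = (acc.1 ++ (wl.filter (fun w => f w == some s)).map (fun w => (w, pvJoin p)),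
             acc.2 + (if wl.filter (fun w => f w == some s) = [] then 0 else 1)) := by
        simp only [pvEmitStep, hG s]
        by_cases he : wl.filter (fun w => f w == some s) = [] <;> simp [he]
      rw [hstep]
      simp [pvBL, pvBC]
      omega

theorem pvBL_congr (f f' : String → Option Int) (h : ∀ w, f w = f' w) (wl : List String) :
    ∀ (tail : List (List String)) (k : Int), pvBL f wl tail k = pvBL f' wl tail k := by
  intro tail
  induction tail with
  | nil => intro k; simp [pvBL]
  | cons p ps ih => intro k; simp [pvBL, h, ih]

theorem pvBC_congr (f f' : String → Option Int) (h : ∀ w, f w = f' w) (wl : List String) :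
    ∀ (tail : List (List String)) (k : Int), pvBC f wl tail k = pvBC f' wl tail k := by
  intro tail
  induction tail with
  | nil => intro k; simp [pvBC]
  | cons p ps ih => intro k; simp [pvBC, h, ih]

theorem pv_filter_shift (p : List String) (ps : List (List String)) (wl : List String)
    (k : Int) (hk : 0 ≤ k) :
    wl.filter (fun w => pvFI (p :: ps) w == some (k + 1))
      = (pvKeep p wl).filter (fun w => pvFI ps w == some k) := by
  rw [pvKeep, List.filter_filter]
  apply List.filter_congr
  intro w _
  by_cases hw : w ∈ p
  · simp [pvFI, hw]; omega
  · simp only [pvFI, hw, if_false]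
    cases h : pvFI ps w with
    | none => simp
    | some j => simp

theorem pv_shift (p : List String) (ps : List (List String)) (wl : List String) :
    ∀ (tail : List (List String)) (k : Int), 0 ≤ k →
    pvBL (pvFI (p :: ps)) wl tail (k + 1) = pvBL (pvFI ps) (pvKeep p wl) tail k ∧
    pvBC (pvFI (p :: ps)) wl tail (k + 1) = pvBC (pvFI ps) (pvKeep p wl) tail k := by
  intro tail
  induction tail with
  | nil => intro k _; simp [pvBL, pvBC]
  | cons q qs ih =>
      intro k hk
      have hf := pv_filter_shift p ps wl k hk
      have hih := ih (k + 1) (by omega)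
      constructor
      · simp only [pvBL, hf, hih.1]
      · simp only [pvBC, hf, hih.2]

theorem pv_filter_zero (p : List String) (ps : List (List String)) (wl : List String) :
    wl.filter (fun w => pvFI (p :: ps) w == some 0) = pvHit p wl := by
  rw [pvHit]
  apply List.filter_congr
  intro w _
  by_cases hw : w ∈ p
  · simp [pvFI, hw]
  · simp only [pvFI, hw, if_false]
    cases h : pvFI ps w with
    | none => simp [hw]
    | some j =>
        have := pvFI_nonneg ps w j h
        simp [hw]; omega

theorem pv_bridge :
    ∀ (P : List (List String)) (wl : List String),
    pvFlat P wl = pvBL (pvFI P) wl P 0 ∧ pvCnt P wl = pvBC (pvFI P) wl P 0 := by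
  intro P
  induction P with
  | nil => intro wl; simp [pvFlat, pvCnt, pvBL, pvBC]
  | cons p ps ih =>
      intro wl
      have hshift := pv_shift p ps wl ps 0 (by omega)
      have hih := ih (pvKeep p wl)
      constructor
      · simp only [pvFlat, pvBL, pv_filter_zero, hshift.1, hih.1]
      · simp only [pvCnt, pvBC, pv_filter_zero, hshift.2, hih.2]

theorem pv_main (wl : List String) (P : List (List String)) :
    (P.foldl pvOuterStep ((0 : Int), ([] : List (String × String)), wl)).2.1
      = ((PySem.List.enumerate P 0).foldl (pvEmitStep (pvGroups (pvFP P) wl))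
          (([] : List (String × String)), (0 : Int))).1 ∧
    (P.foldl pvOuterStep ((0 : Int), ([] : List (String × String)), wl)).1
      = ((PySem.List.enumerate P 0).foldl (pvEmitStep (pvGroups (pvFP P) wl))
          (([] : List (String × String)), (0 : Int))).2 := by
  have hA := pv_outer_spec P 0 [] wl
  have hG : ∀ i, (pvGroups (pvFP P) wl).getD i []
      = wl.filter (fun w => (pvFP P).get? w == some i) := by
    intro i
    rw [pvGroups, pv_groups_getD (pvFP P) wl PySem.Dict.empty i]
    simp
  have hB := pv_emit_spec (pvGroups (pvFP P) wl) (fun w => (pvFP P).get? w) wl hG P 0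
    (([] : List (String × String)), (0 : Int))
  have hbr := pv_bridge P wl
  have hcongrL := pvBL_congr (fun w => (pvFP P).get? w) (pvFI P) (fun w => pvFP_get? P w) wl P 0
  have hcongrC := pvBC_congr (fun w => (pvFP P).get? w) (pvFI P) (fun w => pvFP_get? P w) wl P 0
  rw [hA, hB]
  constructor
  · simp [hcongrL, hbr.1]
  · simp [hcongrC, hbr.2]

-- ===== VERDICT (by name: the statement is the Claim_ definition above) =====
theorem WordtoPhraseMatch_spec : Claim_equal_WordtoPhraseMatch := by
  intro wordlist phraselist DELIMITTER _ _
  unfold Spec_WordtoPhraseMatch WordtoPhraseMatch WordtoPhraseMatch_alt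
  have h := pv_main wordlist (phraselist.map (fun item => (PySem.Str.split? item DELIMITTER).getD []))
  exact Prod.ext h.1 h.2
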